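-- pv_equiv track=rewrite | github.com/Sebita20/SebastianDiaz | Ejercicio-N5yN22.py | usar_la_fuerza
-- ===== SOURCE A (Python) =====
-- def usar_la_fuerza(mochila):
--     objetos = 1
--     if len(mochila) == 0:
--         return " La mochila está vacía, no se encotró un sable de luz."
--     elif mochila[-1] == "sable de luz":
--         return f"Luke, encontró su sable de luz. Tuvo que sacar: {objetos} objetos de su mochila"
--     else:
--         objetos += 1
--         return usar_la_fuerza(mochila[:-1])
-- ===== SOURCE B (Python) =====
-- def usar_la_fuerza(mochila):
--     for objeto in reversed(mochila):
--         if objeto == "sable de luz":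
--             return "Luke, encontró su sable de luz. Tuvo que sacar: 1 objetos de su mochila"
--     return " La mochila está vacía, no se encotró un sable de luz."
-- ===== Notes on version B (the rewrite author's own statement) =====
-- stated objective: faster
-- what changed: Replaced the O(n^2) slice-and-recurse (each step copies mochila[:-1]) with a single backward iterative scan over reversed(mochila), keeping A's constant '1 objetos' message.
import Mathlib
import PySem

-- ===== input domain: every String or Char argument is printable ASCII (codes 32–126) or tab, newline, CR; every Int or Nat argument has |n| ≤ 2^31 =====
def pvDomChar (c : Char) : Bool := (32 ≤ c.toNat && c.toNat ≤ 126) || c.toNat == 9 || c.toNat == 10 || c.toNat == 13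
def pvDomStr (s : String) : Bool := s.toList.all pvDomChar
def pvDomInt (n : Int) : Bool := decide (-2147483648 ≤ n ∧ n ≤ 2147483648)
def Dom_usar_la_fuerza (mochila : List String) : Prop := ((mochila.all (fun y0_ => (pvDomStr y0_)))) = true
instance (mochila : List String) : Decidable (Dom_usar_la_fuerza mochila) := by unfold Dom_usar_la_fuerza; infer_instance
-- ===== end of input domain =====

-- B replaces A's O(n^2) slice-and-recurse with a single backward iterative scan (faster).


-- ===== PORT A =====
def usar_la_fuerza (mochila : List String) : String :=
  let objetos : Int := 1
  if mochila.length = 0 then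
    " La mochila está vacía, no se encotró un sable de luz."
  else if PySem.List.pyGet? mochila (-1) = some "sable de luz" then
    "Luke, encontró su sable de luz. Tuvo que sacar: " ++ PySem.Int.toStr objetos ++ " objetos de su mochila"
  else
    usar_la_fuerza (PySem.List.slice mochila none (some (-1)))
termination_by mochila.length
decreasing_by
  simp only [PySem.List.slice_to_neg_one, List.length_dropLast]
  omega

-- ===== PORT B =====
-- the 'for objeto in reversed(mochila)' loop of Source B
def pvScanRev : List String → String
  | [] => " La mochila está vacía, no se encotró un sable de luz."
  | objeto :: resto =>
    if objeto = "sable de luz" then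
      "Luke, encontró su sable de luz. Tuvo que sacar: 1 objetos de su mochila"
    else
      pvScanRev resto

def usar_la_fuerza_alt (mochila : List String) : String :=
  pvScanRev mochila.reverse

-- ===== PRECONDITION & SPEC =====
def Spec_usar_la_fuerza (mochila : List String) (out : String) : Prop := out = usar_la_fuerza_alt mochila
instance (mochila : List String) (out : String) : Decidable (Spec_usar_la_fuerza mochila out) := by unfold Spec_usar_la_fuerza; infer_instance

-- ===== CLAIM (what is proved, stated in full; the proofs are below) =====
def Claim_equal_usar_la_fuerza : Prop := ∀ (mochila : List String), Dom_usar_la_fuerza mochila → Spec_usar_la_fuerza mochila (usar_la_fuerza mochila)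

-- ===== LEMMAS AND PROOFS =====
theorem usar_la_fuerza_eq_alt (mochila : List String) :
    usar_la_fuerza mochila = usar_la_fuerza_alt mochila := by
  unfold usar_la_fuerza_alt
  induction mochila using List.reverseRecOn with
  | nil => simp [usar_la_fuerza, pvScanRev]
  | append_singleton xs x ih =>
    rw [usar_la_fuerza]
    simp only [List.length_append, List.length_singleton, List.reverse_append,
      List.reverse_singleton, List.singleton_append,
      PySem.List.pyGet?_neg_one_append_singleton, PySem.List.slice_to_neg_one,
      List.dropLast_concat, pvScanRev]
    by_cases hx : x = "sable de luz"
    · simp only [hx, Nat.add_one_ne_zero, if_false, if_true]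
      decide
    · simp [hx, ih]

-- ===== VERDICT (by name: the statement is the Claim_ definition above) =====
theorem usar_la_fuerza_spec : Claim_equal_usar_la_fuerza := by
  intro mochila _
  exact usar_la_fuerza_eq_alt mochila
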